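-- pv_equiv track=rewrite | github.com/ishaanbuildsthings/leetcode | problems/Leetcode/3792. Sum of Increasing Product Blocks.py | sumOfBlocks
-- ===== SOURCE A (Python) =====
-- def sumOfBlocks(n: int) -> int:
--     res = 0
--     MOD = 10**9 + 7
--     idx = 1
--     for v in range(1, n + 1):
--         curr = 1
--         for j in range(idx, idx + v):
--             curr *= j
--             curr %= MOD
--         idx += v
--         res += curr
--         res %= MOD
--
--     return res
-- ===== SOURCE B (Python) =====
-- def sumOfBlocks(n: int) -> int:
--     MOD = 10**9 + 7
--     total = n * (n + 1) // 2 if n > 0 else 0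
--     res = 0
--     curr = 1
--     boundary = 1
--     width = 1
--     for j in range(1, total + 1):
--         curr = curr * j % MOD
--         if j == boundary:
--             res = (res + curr) % MOD
--             curr = 1
--             boundary = boundary + width + 1
--             width = width + 1
--     return res
-- ===== Notes on version B (the rewrite author's own statement) =====
-- stated objective: alternative
-- what changed: Replaces A's nested loops (outer over blocks, inner over each block's members) by a single flat pass over all block members in order, keeping one running modular product that is flushed into the sum whenever the index reaches the next triangular boundary.
import Mathlib
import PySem

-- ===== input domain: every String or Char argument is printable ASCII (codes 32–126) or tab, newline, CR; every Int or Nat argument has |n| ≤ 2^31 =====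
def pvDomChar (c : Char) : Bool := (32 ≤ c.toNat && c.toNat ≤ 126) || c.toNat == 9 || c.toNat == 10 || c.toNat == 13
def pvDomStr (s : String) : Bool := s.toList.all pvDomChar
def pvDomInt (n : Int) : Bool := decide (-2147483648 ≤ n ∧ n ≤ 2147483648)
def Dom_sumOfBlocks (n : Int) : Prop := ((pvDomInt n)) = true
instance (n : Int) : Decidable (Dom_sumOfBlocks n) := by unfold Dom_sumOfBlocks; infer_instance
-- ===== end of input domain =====

-- B replaces A's nested per-block loops by a single flat pass over all block members that flushes
-- the running modular product at each triangular boundary; same cost, different decomposition.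


-- ===== PORT A =====
-- MOD = 10**9 + 7 (the same constant in both programs)
def pvMod : Int := 10 ^ 9 + 7

-- one step of A's outer loop: state (res, idx); the inner loop is the fold computing curr
def aStep (st : Int × Int) (v : Int) : Int × Int :=
  let curr := (PySem.List.pyRange st.2 (st.2 + v) 1).foldl
    (fun c j => PySem.Int.mod (c * j) pvMod) 1
  (PySem.Int.mod (st.1 + curr) pvMod, st.2 + v)

def sumOfBlocks (n : Int) : Int :=
  ((PySem.List.pyRange 1 (n + 1) 1).foldl aStep (0, 1)).1

-- ===== PORT B =====
-- one step of B's single loop: state (res, curr, boundary, width)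
def bStep (st : Int × Int × Int × Int) (j : Int) : Int × Int × Int × Int :=
  let curr := PySem.Int.mod (st.2.1 * j) pvMod
  if j = st.2.2.1 then
    (PySem.Int.mod (st.1 + curr) pvMod, 1, st.2.2.1 + st.2.2.2 + 1, st.2.2.2 + 1)
  else
    (st.1, curr, st.2.2.1, st.2.2.2)

def sumOfBlocks_alt (n : Int) : Int :=
  let total : Int := if 0 < n then PySem.Int.floordiv (n * (n + 1)) 2 else 0
  ((PySem.List.pyRange 1 (total + 1) 1).foldl bStep (0, 1, 1, 1)).1

-- ===== PRECONDITION & SPEC =====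
def Spec_sumOfBlocks (n : Int) (out : Int) : Prop := out = sumOfBlocks_alt n
instance (n : Int) (out : Int) : Decidable (Spec_sumOfBlocks n out) := by unfold Spec_sumOfBlocks; infer_instance

-- ===== CLAIM (what is proved, stated in full; the proofs are below) =====
def Claim_equal_sumOfBlocks : Prop := ∀ (n : Int), Dom_sumOfBlocks n → Spec_sumOfBlocks n (sumOfBlocks n)

-- ===== LEMMAS AND PROOFS =====

-- triangular numbers
def triL : Nat → Int
  | 0 => 0
  | k + 1 => triL k + (k + 1)

lemma triL_nonneg (k : Nat) : 0 ≤ triL k := by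
  induction k with
  | zero => simp [triL]
  | succ k ih => simp only [triL]; omega

lemma two_mul_triL (k : Nat) : 2 * triL k = (k : Int) * ((k : Int) + 1) := by
  induction k with
  | zero => simp [triL]
  | succ k ih => simp only [triL]; push_cast; push_cast at ih; ring_nf; ring_nf at ih; omega

lemma triL_eq_floordiv (k : Nat) :
    PySem.Int.floordiv ((k : Int) * ((k : Int) + 1)) 2 = triL k := by
  rw [PySem.Int.floordiv_eq_ediv_of_pos (by norm_num), ← two_mul_triL k,
    Int.mul_ediv_cancel_left _ (by norm_num)]

-- B's loop consumes one whole block: from a state whose boundary is b and whose remaining range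
-- is the block ending at b, it flushes the modular product and resets.
lemma blockB (m : Nat) : ∀ (res c b w : Int),
    (PySem.List.pyRange (b - m) (b + 1) 1).foldl bStep (res, c, b, w)
      = (PySem.Int.mod
            (res + (PySem.List.pyRange (b - m) (b + 1) 1).foldl
              (fun c j => PySem.Int.mod (c * j) pvMod) c)
            pvMod, 1, b + w + 1, w + 1) := by
  induction m with
  | zero =>
      intro res c b w
      rw [show b - (0 : Nat) = b by push_cast; ring, PySem.List.pyRange_one_singleton]
      simp [bStep]
  | succ m ih =>
      intro res c b w
      have hlt : b - ((m : Int) + 1) < b + 1 := by omega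
      rw [show ((m + 1 : Nat) : Int) = (m : Int) + 1 by push_cast; ring,
        PySem.List.pyRange_one_cons hlt]
      have hne : b - ((m : Int) + 1) ≠ b := by omega
      have hstep : bStep (res, c, b, w) (b - ((m : Int) + 1))
          = (res, PySem.Int.mod (c * (b - ((m : Int) + 1))) pvMod, b, w) := by
        simp [bStep, hne]
      rw [List.foldl_cons, hstep, List.foldl_cons,
        show b - ((m : Int) + 1) + 1 = b - (m : Int) by ring]
      exact ih res _ b w

-- the joint invariant: after processing k blocks, A's accumulator equals B's, A's idx is
-- triL k + 1, and B's state is reset with boundary triL k + (k+1) and width k+1.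
lemma mainInv (k : Nat) :
    ((PySem.List.pyRange 1 ((k : Int) + 1) 1).foldl aStep (0, 1)).2 = triL k + 1 ∧
    (PySem.List.pyRange 1 (triL k + 1) 1).foldl bStep (0, 1, 1, 1)
      = (((PySem.List.pyRange 1 ((k : Int) + 1) 1).foldl aStep (0, 1)).1,
          1, triL k + ((k : Int) + 1), (k : Int) + 1) := by
  induction k with
  | zero =>
      constructor <;> simp [PySem.List.pyRange_one_eq_nil, triL]
  | succ k ih =>
      obtain ⟨ihA, ihB⟩ := ih
      have hA : PySem.List.pyRange 1 ((k : Int) + 1 + 1) 1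
          = PySem.List.pyRange 1 ((k : Int) + 1) 1 ++ [(k : Int) + 1] :=
        PySem.List.pyRange_one_succ_right (by omega)
      have htk := triL_nonneg k
      have hB : PySem.List.pyRange 1 (triL (k + 1) + 1) 1
          = PySem.List.pyRange 1 (triL k + 1) 1
            ++ PySem.List.pyRange (triL k + 1) (triL (k + 1) + 1) 1 := by
        refine PySem.List.pyRange_one_append 1 (triL k + 1) (triL (k + 1) + 1) (by omega) ?_
        simp only [triL]; omega
      have hcast : ((k + 1 : Nat) : Int) = (k : Int) + 1 := by push_cast; ring
      constructor
      · rw [hcast, hA, List.foldl_append]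
        simp only [List.foldl_cons, List.foldl_nil, aStep, ihA, triL]
        ring
      · rw [hB, List.foldl_append, ihB]
        have hb : triL k + ((k : Int) + 1) = triL (k + 1) := by
          simp only [triL]
        have hrange : triL k + 1 = triL (k + 1) - (k : Nat) := by
          simp only [triL]; ring
        rw [hb, hrange, blockB k]
        rw [hcast, hA, List.foldl_append]
        simp only [List.foldl_cons, List.foldl_nil, aStep, ihA]
        rw [show triL k + 1 + ((k : Int) + 1) = triL (k + 1) + 1 from by
              simp only [triL]; ring,
            show triL k + 1 = triL (k + 1) - (k : Nat) from by
              simp only [triL]; ring,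
            show triL (k + 1) + ((k : Int) + 1) + 1 = triL (k + 1) + ((k : Int) + 1 + 1) from by
              ring]

-- ===== VERDICT (by name: the statement is the Claim_ definition above) =====
theorem sumOfBlocks_spec : Claim_equal_sumOfBlocks := by
  intro n _
  unfold Spec_sumOfBlocks sumOfBlocks sumOfBlocks_alt
  by_cases hn : 0 < n
  · have hk : ((n.toNat : Int)) = n := Int.toNat_of_nonneg (le_of_lt hn)
    obtain ⟨_, hB⟩ := mainInv n.toNat
    rw [hk] at hB
    simp only [hn, if_pos]
    rw [← hk, triL_eq_floordiv n.toNat, hk, hB]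
  · simp only [hn, if_false]
    rw [PySem.List.pyRange_one_eq_nil (by omega), PySem.List.pyRange_one_eq_nil (by omega)]
    simp
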